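-- pv_equiv track=rewrite | github.com/Ajay9345/Prototype-Lab | services/lab_test_handler.py | get_test_category
-- ===== SOURCE A (Python) =====
-- from typing import Dict, List, Optional
--
-- CATEGORY_MARKERS: Dict[str, tuple] = {
--     "Complete Blood Count (CBC)": ({"hemoglobin", "wbc", "rbc", "platelets"}, 2),
--     "Lipid Profile":              ({"total_cholesterol", "ldl", "hdl", "triglycerides"}, 2),
--     "Blood Sugar Test":           ({"fasting", "pp", "random", "hba1c"}, 1),
--     "Thyroid Function Test":      ({"tsh", "t3", "t4", "free_t3", "free_t4"}, 1),
--     "Liver Function Test":        ({"sgot", "sgpt", "alp", "bilirubin_total"}, 2),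
--     "Kidney Function Test":       ({"creatinine", "bun", "uric_acid"}, 1),
-- }
--
-- def get_test_category(parsed_values: Dict) -> str:
--     if not parsed_values:
--         return "unknown"
--
--     keys = set(parsed_values.keys())
--     for category, (markers, min_overlap) in CATEGORY_MARKERS.items():
--         if len(keys & markers) >= min_overlap:
--             return category
--
--     return "General Lab Test"
-- ===== SOURCE B (Python) =====
-- # B: one pass over the keys with a precomputed reverse marker->category index,
-- # instead of a per-category set intersection.
-- from typing import Dict, List, Optional
--
-- CATEGORY_MARKERS: Dict[str, tuple] = {
--     "Complete Blood Count (CBC)": ({"hemoglobin", "wbc", "rbc", "platelets"}, 2),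
--     "Lipid Profile":              ({"total_cholesterol", "ldl", "hdl", "triglycerides"}, 2),
--     "Blood Sugar Test":           ({"fasting", "pp", "random", "hba1c"}, 1),
--     "Thyroid Function Test":      ({"tsh", "t3", "t4", "free_t3", "free_t4"}, 1),
--     "Liver Function Test":        ({"sgot", "sgpt", "alp", "bilirubin_total"}, 2),
--     "Kidney Function Test":       ({"creatinine", "bun", "uric_acid"}, 1),
-- }
--
-- _REVERSE: Dict[str, str] = {}
-- for _cat, (_markers, _) in CATEGORY_MARKERS.items():
--     for _m in _markers:
--         _REVERSE[_m] = _cat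
--
-- def get_test_category(parsed_values: Dict) -> str:
--     if not parsed_values:
--         return "unknown"
--
--     counts: Dict[str, int] = {}
--     for key in parsed_values:
--         cat = _REVERSE.get(key)
--         if cat is not None:
--             counts[cat] = counts.get(cat, 0) + 1
--
--     for category, (_markers, min_overlap) in CATEGORY_MARKERS.items():
--         if counts.get(category, 0) >= min_overlap:
--             return category
--
--     return "General Lab Test"
-- ===== Notes on version B (the rewrite author's own statement) =====
-- stated objective: alternative
-- what changed: Replaced the per-category set-intersection loop by a precomputed reverse marker-to-category index and a single counting pass over the keys, then a scan of the category table against the counters.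
import Mathlib
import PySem

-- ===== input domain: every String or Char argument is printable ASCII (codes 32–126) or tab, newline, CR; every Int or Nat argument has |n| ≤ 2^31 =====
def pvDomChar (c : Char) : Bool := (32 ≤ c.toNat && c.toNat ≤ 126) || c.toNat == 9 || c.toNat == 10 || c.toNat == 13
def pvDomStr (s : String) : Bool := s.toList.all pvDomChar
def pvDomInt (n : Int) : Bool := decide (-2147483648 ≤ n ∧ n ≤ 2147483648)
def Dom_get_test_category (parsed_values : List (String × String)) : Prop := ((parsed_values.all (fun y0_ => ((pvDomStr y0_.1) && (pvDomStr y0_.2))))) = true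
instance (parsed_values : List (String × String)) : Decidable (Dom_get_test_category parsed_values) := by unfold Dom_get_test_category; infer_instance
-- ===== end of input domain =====

-- B replaces the per-category set-intersection loop by a reverse marker→category index
-- and a single counting pass over the keys (alternative decomposition, same result).

-- ===== PORT A =====
-- the module constant CATEGORY_MARKERS (shared by both Pythons)
def pvCatTable : List (String × List String × Int) :=
  [("Complete Blood Count (CBC)", ["hemoglobin", "wbc", "rbc", "platelets"], 2),
   ("Lipid Profile", ["total_cholesterol", "ldl", "hdl", "triglycerides"], 2),
   ("Blood Sugar Test", ["fasting", "pp", "random", "hba1c"], 1),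
   ("Thyroid Function Test", ["tsh", "t3", "t4", "free_t3", "free_t4"], 1),
   ("Liver Function Test", ["sgot", "sgpt", "alp", "bilirubin_total"], 2),
   ("Kidney Function Test", ["creatinine", "bun", "uric_acid"], 1)]

-- the 'for category, (markers, min_overlap) in CATEGORY_MARKERS.items()' loop with early return
def pvFindCat (keys : PySem.Set String) : List (String × List String × Int) → String
  | [] => "General Lab Test"
  | (category, markers, min_overlap) :: rest =>
      if min_overlap ≤ PySem.Set.len (PySem.Set.inter keys markers) then category
      else pvFindCat keys rest

def get_test_category (parsed_values : List (String × String)) : String :=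
  if parsed_values = [] then "unknown"
  else pvFindCat (PySem.Set.ofList (parsed_values.map Prod.fst)) pvCatTable

-- ===== PORT B =====
-- _REVERSE: marker → category, built once from CATEGORY_MARKERS
def pvReverse : PySem.Dict String String :=
  PySem.Dict.mk
    [("hemoglobin", "Complete Blood Count (CBC)"), ("wbc", "Complete Blood Count (CBC)"),
     ("rbc", "Complete Blood Count (CBC)"), ("platelets", "Complete Blood Count (CBC)"),
     ("total_cholesterol", "Lipid Profile"), ("ldl", "Lipid Profile"),
     ("hdl", "Lipid Profile"), ("triglycerides", "Lipid Profile"),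
     ("fasting", "Blood Sugar Test"), ("pp", "Blood Sugar Test"),
     ("random", "Blood Sugar Test"), ("hba1c", "Blood Sugar Test"),
     ("tsh", "Thyroid Function Test"), ("t3", "Thyroid Function Test"),
     ("t4", "Thyroid Function Test"), ("free_t3", "Thyroid Function Test"),
     ("free_t4", "Thyroid Function Test"),
     ("sgot", "Liver Function Test"), ("sgpt", "Liver Function Test"),
     ("alp", "Liver Function Test"), ("bilirubin_total", "Liver Function Test"),
     ("creatinine", "Kidney Function Test"), ("bun", "Kidney Function Test"),
     ("uric_acid", "Kidney Function Test")]

-- the counting pass: 'for key in parsed_values: …' (a dict's keys, in first-occurrence order)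
def pvCounts (keys : List String) : PySem.Dict String Int :=
  keys.foldl
    (fun counts key =>
      match pvReverse.get? key with
      | some cat => counts.modify cat 0 (· + 1)
      | none => counts)
    PySem.Dict.empty

-- the final 'for category, (_markers, min_overlap) in CATEGORY_MARKERS.items()' loop
def pvPick (counts : PySem.Dict String Int) : List (String × List String × Int) → String
  | [] => "General Lab Test"
  | (category, _, min_overlap) :: rest =>
      if min_overlap ≤ counts.getD category 0 then category
      else pvPick counts rest

def get_test_category_alt (parsed_values : List (String × String)) : String :=
  if parsed_values = [] then "unknown"
  else pvPick (pvCounts (PySem.List.dedup (parsed_values.map Prod.fst))) pvCatTable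

-- ===== PRECONDITION & SPEC =====
def Spec_get_test_category (parsed_values : List (String × String)) (out : String) : Prop := out = get_test_category_alt parsed_values
instance (parsed_values : List (String × String)) (out : String) : Decidable (Spec_get_test_category parsed_values out) := by unfold Spec_get_test_category; infer_instance

-- ===== CLAIM (what is proved, stated in full; the proofs are below) =====
def Claim_equal_get_test_category : Prop := ∀ (parsed_values : List (String × String)), Dom_get_test_category parsed_values → Spec_get_test_category parsed_values (get_test_category parsed_values)

-- ===== LEMMAS AND PROOFS =====

-- the counter after the fold: per category, the number of its markers among the keys
theorem pvCounts_getD (l : List String) (d : PySem.Dict String Int) (cat : String) :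
    (l.foldl
      (fun counts key =>
        match pvReverse.get? key with
        | some c => counts.modify c 0 (· + 1)
        | none => counts) d).getD cat 0
    = d.getD cat 0 + ((l.filter (fun k => pvReverse.get? k == some cat)).length : Int) := by
  induction l generalizing d with
  | nil => simp
  | cons k l ih =>
      simp only [List.foldl_cons, List.filter_cons]
      cases h : pvReverse.get? k with
      | none => rw [ih]; simp
      | some c =>
          rw [ih]
          by_cases hc : c = cat
          · subst hc
            simp [PySem.Dict.getD_modify_self]
            ring
          · rw [PySem.Dict.getD_modify_of_ne]
            · simp [hc]
            · exact fun he => hc he.symm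

-- all 24 marker strings (the keys of the reverse index), proof helper only
def pvAllMarkers : List String :=
  ["hemoglobin", "wbc", "rbc", "platelets",
   "total_cholesterol", "ldl", "hdl", "triglycerides",
   "fasting", "pp", "random", "hba1c",
   "tsh", "t3", "t4", "free_t3", "free_t4",
   "sgot", "sgpt", "alp", "bilirubin_total",
   "creatinine", "bun", "uric_acid"]

-- the reverse index answers 'some cat' exactly on cat's markers, for each table row
theorem pvRev_mem (cat : String) (markers : List String) (mo : Int)
    (h : (cat, markers, mo) ∈ pvCatTable) (k : String) :
    (pvReverse.get? k == some cat) = markers.contains k := by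
  simp only [pvCatTable, List.mem_cons, List.not_mem_nil, or_false, Prod.mk.injEq] at h
  by_cases hk : k ∈ pvAllMarkers
  · simp only [pvAllMarkers, List.mem_cons, List.not_mem_nil, or_false] at hk
    rcases h with ⟨rfl, rfl, rfl⟩ | ⟨rfl, rfl, rfl⟩ | ⟨rfl, rfl, rfl⟩ | ⟨rfl, rfl, rfl⟩ |
      ⟨rfl, rfl, rfl⟩ | ⟨rfl, rfl, rfl⟩ <;>
    rcases hk with rfl | rfl | rfl | rfl | rfl | rfl | rfl | rfl | rfl | rfl | rfl | rfl |
      rfl | rfl | rfl | rfl | rfl | rfl | rfl | rfl | rfl | rfl | rfl | rfl <;> decide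
  · have h1 : pvReverse.get? k = none := by
      rw [PySem.Dict.get?_eq_none_iff_not_mem_keys]
      simpa [pvReverse, pvAllMarkers, PySem.Dict.keys_mk] using hk
    simp only [pvAllMarkers, List.mem_cons, List.not_mem_nil, or_false, not_or] at hk
    rcases h with ⟨rfl, rfl, rfl⟩ | ⟨rfl, rfl, rfl⟩ | ⟨rfl, rfl, rfl⟩ | ⟨rfl, rfl, rfl⟩ |
      ⟨rfl, rfl, rfl⟩ | ⟨rfl, rfl, rfl⟩ <;>
    simp [h1, List.contains_eq_mem] <;> tauto

-- each category's counter equals the size of the intersection A computes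
theorem pvCounts_eq_inter (ks : List String) (cat : String) (markers : List String) (mo : Int)
    (h : (cat, markers, mo) ∈ pvCatTable) :
    (pvCounts ks).getD cat 0 = PySem.Set.len (PySem.Set.inter ks markers) := by
  unfold pvCounts
  rw [pvCounts_getD]
  have : (fun k => pvReverse.get? k == some cat) = (fun k => markers.contains k) := by
    funext k; exact pvRev_mem cat markers mo h k
  rw [this]
  simp [PySem.Set.len, PySem.Set.inter]

-- the two table scans agree once the counters match the intersections
theorem pvScan_eq (ks : List String) (t : List (String × List String × Int))
    (ht : ∀ e ∈ t, e ∈ pvCatTable) :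
    pvFindCat ks t = pvPick (pvCounts ks) t := by
  induction t with
  | nil => rfl
  | cons e rest ih =>
      obtain ⟨cat, markers, mo⟩ := e
      simp only [pvFindCat, pvPick]
      rw [pvCounts_eq_inter ks cat markers mo (ht _ (List.mem_cons_self ..))]
      split_ifs with hc
      · rfl
      · exact ih fun e he => ht e (List.mem_cons_of_mem _ he)

-- ===== VERDICT (by name: the statement is the Claim_ definition above) =====
theorem get_test_category_spec : Claim_equal_get_test_category := by
  intro pv _
  unfold Spec_get_test_category get_test_category get_test_category_alt
  by_cases hpv : pv = []
  · simp [hpv]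
  · simp only [hpv, if_false]
    rw [PySem.List.dedup_eq_ofList, pvScan_eq]
    intro e he; exact he
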